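-- pv_equiv track=rewrite | github.com/thunlp/QAJudge | tools/ft_tools.py | get_ft_id
-- ===== SOURCE A (Python) =====
-- possible_set = [
--     (196, 0),
--     (348, 0),
--     # (133, 1),
--     (264, 0),
--     (133, 0),
--     (354, 0),
--     (234, 0),
--     (266, 0),
--     (274, 0),
--     (347, 0),
--     (267, 0),
--     (263, 0),
--     (238, 0),
--     (275, 0),
--     (345, 0),
--     (312, 0),
--     # (134, 0),
--     (224, 0),
--     (141, 0),
--     (128, 0),
--     (303, 0),
--     # (150, 0),
--     # (269, 0),
-- ]
--
-- def get_ft_id(data):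
--     cnt = 0
--     ft_list = data["meta_info"]["law"]
--     se = set()
--     for x, y, z in ft_list:
--         se.add((x, y))
--     temp = list(se)
--     for x, y in temp:
--         if (x, y) in possible_set:
--             cnt += 1
--     if cnt != 1:
--         return -1
--
--     for x, y in temp:
--         if (x, y) in possible_set:
--             for a in range(0, len(possible_set)):
--                 if possible_set[a] == (x, y):
--                     return a
--
--     raise NotImplementedError
-- ===== SOURCE B (Python) =====
-- possible_set = [
--     (196, 0),
--     (348, 0),
--     (264, 0),
--     (133, 0),
--     (354, 0),
--     (234, 0),
--     (266, 0),
--     (274, 0),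
--     (347, 0),
--     (267, 0),
--     (263, 0),
--     (238, 0),
--     (275, 0),
--     (345, 0),
--     (312, 0),
--     (224, 0),
--     (141, 0),
--     (128, 0),
--     (303, 0),
-- ]
--
-- def get_ft_id(data):
--     pairs = {(x, y) for x, y, z in data["meta_info"]["law"]}
--     # one pass over possible_set: collect the indices of entries hit by the data
--     hits = [i for i, q in enumerate(possible_set) if q in pairs]
--     return hits[0] if len(hits) == 1 else -1
-- ===== Notes on version B (the rewrite author's own statement) =====
-- stated objective: simpler
-- what changed: A builds the distinct-pair set and then scans it twice (one pass to count matches, then a second pass with a nested index scan over possible_set to recover the index); B makes a single enumerate pass over possible_set collecting the indices hit by the data's pair set and returns the lone hit or -1.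
import Mathlib
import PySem

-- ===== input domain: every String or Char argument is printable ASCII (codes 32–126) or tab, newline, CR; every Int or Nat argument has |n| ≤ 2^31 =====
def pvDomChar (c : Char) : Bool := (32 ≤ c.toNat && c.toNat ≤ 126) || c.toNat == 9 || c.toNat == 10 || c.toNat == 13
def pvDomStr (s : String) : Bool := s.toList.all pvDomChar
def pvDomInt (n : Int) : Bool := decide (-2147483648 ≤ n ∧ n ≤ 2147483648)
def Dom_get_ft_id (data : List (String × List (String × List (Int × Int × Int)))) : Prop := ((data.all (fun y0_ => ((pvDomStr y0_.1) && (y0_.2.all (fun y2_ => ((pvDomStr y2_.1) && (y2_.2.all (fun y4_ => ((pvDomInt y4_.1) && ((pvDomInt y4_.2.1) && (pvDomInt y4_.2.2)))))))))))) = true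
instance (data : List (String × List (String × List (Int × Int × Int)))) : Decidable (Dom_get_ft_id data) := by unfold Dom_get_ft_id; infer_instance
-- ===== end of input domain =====

-- B merges A's two scans over possible_set (count pass + find pass with an inner index scan)
-- into ONE enumerate pass collecting the matching indices; objective: simpler.


-- ===== PORT A =====
def pvPossible : List (Int × Int) :=
  [(196,0),(348,0),(264,0),(133,0),(354,0),(234,0),(266,0),(274,0),(347,0),(267,0),
   (263,0),(238,0),(275,0),(345,0),(312,0),(224,0),(141,0),(128,0),(303,0)]

-- inner 'for a in range(0, len(possible_set)): if possible_set[a] == (x, y): return a'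
def pvRangeScan (p : Int × Int) : List (Int × Int) → Int → Option Int
  | [], _ => none
  | q :: rest, a => if q = p then some a else pvRangeScan p rest (a + 1)

-- A's second 'for x, y in temp' loop; the [] case is Python's 'raise NotImplementedError'
-- path (we return -1 there; under the claim's hypotheses that branch is proved unreachable)
def pvFindLoop : List (Int × Int) → Int
  | [] => -1
  | p :: rest =>
    if pvPossible.contains p then
      match pvRangeScan p pvPossible 0 with
      | some a => a
      | none => pvFindLoop rest
    else pvFindLoop rest

def get_ft_id (data : List (String × List (String × List (Int × Int × Int)))) : Int :=
  match (PySem.Dict.mk data).get? "meta_info" with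
  | none => -1  -- KeyError: excluded by Pre_
  | some mi =>
    match (PySem.Dict.mk mi).get? "law" with
    | none => -1  -- KeyError: excluded by Pre_
    | some ft_list =>
      let temp : PySem.Set (Int × Int) :=
        ft_list.foldl (fun se t => PySem.Set.add se (t.1, t.2.1)) PySem.Set.empty
      let cnt : Int :=
        temp.foldl (fun c p => if pvPossible.contains p then c + 1 else c) 0
      if cnt ≠ 1 then -1 else pvFindLoop temp

-- ===== PORT B =====
def get_ft_id_alt (data : List (String × List (String × List (Int × Int × Int)))) : Int :=
  match (PySem.Dict.mk data).get? "meta_info" with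
  | none => -1  -- KeyError: excluded by Pre_
  | some mi =>
    match (PySem.Dict.mk mi).get? "law" with
    | none => -1  -- KeyError: excluded by Pre_
    | some ft_list =>
      let pairs : PySem.Set (Int × Int) :=
        PySem.Set.ofList (ft_list.map (fun t => (t.1, t.2.1)))
      let hits : List Int :=
        (PySem.List.enumerate pvPossible).filterMap
          (fun iq => if PySem.Set.contains pairs iq.2 then some iq.1 else none)
      match hits with
      | [i] => i
      | _ => -1

-- ===== PRECONDITION & SPEC =====
-- Pre_ excludes exactly the inputs on which A raises KeyError: a missing "meta_info" key
-- or a missing "law" key inside it (B raises the same KeyError there).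
def Pre_get_ft_id (data : List (String × List (String × List (Int × Int × Int)))) : Prop :=
  (match (PySem.Dict.mk data).get? "meta_info" with
   | none => false
   | some mi => ((PySem.Dict.mk mi).get? "law").isSome) = true
instance (data : List (String × List (String × List (Int × Int × Int)))) : Decidable (Pre_get_ft_id data) := by unfold Pre_get_ft_id; infer_instance

def pvWitness_get_ft_id : (List (String × List (String × List (Int × Int × Int)))) :=
  [("meta_info", [("law", [(196, 0, 1)])])]

def Spec_get_ft_id (data : List (String × List (String × List (Int × Int × Int)))) (out : Int) : Prop := out = get_ft_id_alt data
instance (data : List (String × List (String × List (Int × Int × Int)))) (out : Int) : Decidable (Spec_get_ft_id data out) := by unfold Spec_get_ft_id; infer_instance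

-- ===== CLAIM (what is proved, stated in full; the proofs are below) =====
def Claim_equal_get_ft_id : Prop := ∀ (data : List (String × List (String × List (Int × Int × Int)))), Dom_get_ft_id data → Pre_get_ft_id data → Spec_get_ft_id data (get_ft_id data)

-- ===== LEMMAS AND PROOFS =====

-- A's set-building fold equals B's set comprehension
lemma pv_set_eq (l : List (Int × Int × Int)) :
    l.foldl (fun se t => PySem.Set.add se (t.1, t.2.1)) PySem.Set.empty
      = PySem.Set.ofList (l.map (fun t => (t.1, t.2.1))) := by
  rw [PySem.Set.ofList_eq_foldl, List.foldl_map]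
  rfl

-- B's hit list has as many elements as possible_set has entries hit by S
lemma pv_hits_length (S : List (Int × Int)) :
    ∀ (P : List (Int × Int)) (s : Int),
      ((PySem.List.enumerate P s).filterMap
        (fun iq => if S.contains iq.2 then some iq.1 else none)).length
        = P.countP (fun q => S.contains q) := by
  intro P
  induction P with
  | nil => intro s; simp [PySem.List.enumerate_nil]
  | cons q P' ih =>
    intro s
    rw [PySem.List.enumerate_cons, List.filterMap_cons, List.countP_cons]
    cases h : S.contains q
    · simp only [Bool.false_eq_true, if_false, ih (s + 1)]
      omega
    · simp only [if_true, List.length_cons, ih (s + 1)]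

-- nodup lists: counting the matches from either side gives the same number
lemma pv_countP_comm (S P : List (Int × Int)) (hS : S.Nodup) (hP : P.Nodup) :
    S.countP (fun p => P.contains p) = P.countP (fun q => S.contains q) := by
  simp only [List.countP_eq_length_filter]
  rw [← List.toFinset_card_of_nodup (List.Nodup.filter _ hS),
      ← List.toFinset_card_of_nodup (List.Nodup.filter _ hP),
      List.toFinset_filter, List.toFinset_filter]
  have h1 : {x ∈ S.toFinset | P.contains x = true} = S.toFinset ∩ P.toFinset := by
    apply Finset.ext; intro x
    simp [List.mem_toFinset]
  have h2 : {x ∈ P.toFinset | S.contains x = true} = P.toFinset ∩ S.toFinset := by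
    apply Finset.ext; intro x
    simp [List.mem_toFinset]
  rw [h1, h2, Finset.inter_comm]

-- when B's hit list is exactly [j], A's inner index scan returns j for every hit element
lemma pv_key (S : List (Int × Int)) :
    ∀ (P : List (Int × Int)) (s j : Int) (p : Int × Int),
      ((PySem.List.enumerate P s).filterMap
        (fun iq => if S.contains iq.2 then some iq.1 else none)) = [j] →
      p ∈ P → S.contains p = true → pvRangeScan p P s = some j := by
  intro P
  induction P with
  | nil => intro s j p _ hp; simp at hp
  | cons q P' ih =>
    intro s j p hh hp hps
    rw [PySem.List.enumerate_cons, List.filterMap_cons] at hh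
    cases hq : S.contains q with
    | true =>
      rw [hq] at hh
      simp only [if_true, List.cons.injEq] at hh
      obtain ⟨rfl, htail⟩ := hh
      -- no later hit: every element of P' fails the membership test
      have hnone : ∀ r ∈ P', S.contains r = false := by
        intro r hr
        by_contra hc
        have hc' : S.contains r = true := by
          cases hcr : S.contains r
          · exact absurd hcr hc
          · rfl
        have : ∃ k, ∃ _ : k < P'.length, r = P'[k] := by
          rcases List.getElem_of_mem hr with ⟨k, hk, he⟩
          exact ⟨k, hk, he.symm⟩
        rcases this with ⟨k, hk, rfl⟩
        have : ((s + 1 + (k : Int)), P'[k]) ∈ PySem.List.enumerate P' (s + 1) :=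
          (PySem.List.mem_enumerate_iff P' (s + 1) _).2 ⟨k, hk, rfl⟩
        have : (s + 1 + (k : Int)) ∈ List.filterMap
            (fun iq => if S.contains iq.2 = true then some iq.1 else none)
            (PySem.List.enumerate P' (s + 1)) := by
          rw [List.mem_filterMap]
          exact ⟨_, this, by rw [if_pos hc']⟩
        rw [htail] at this
        simp at this
      have hpq : p = q := by
        rcases List.mem_cons.1 hp with hp1 | hp1
        · exact hp1
        · have h2 := hnone p hp1
          rw [hps] at h2
          simp at h2
      subst hpq
      simp [pvRangeScan]
    | false =>
      rw [hq] at hh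
      simp only [Bool.false_eq_true, if_false] at hh
      have hpq : q ≠ p := by
        intro he; rw [he, hps] at hq; exact absurd hq (by simp)
      have hp' : p ∈ P' := by
        rcases List.mem_cons.1 hp with hp1 | hp1
        · exact absurd hp1.symm hpq
        · exact hp1
      rw [pvRangeScan, if_neg hpq]
      exact ih (s + 1) j p hh hp' hps

-- dropping a non-possible element of S does not change B's hit list
lemma pv_hits_drop (p : Int × Int) (S : List (Int × Int))
    (h : pvPossible.contains p = false) :
    ((PySem.List.enumerate pvPossible).filterMap
        (fun iq => if List.contains (p :: S) iq.2 then some iq.1 else none))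
      = ((PySem.List.enumerate pvPossible).filterMap
        (fun iq => if S.contains iq.2 then some iq.1 else none)) := by
  apply List.filterMap_congr
  intro iq hiq
  rcases (PySem.List.mem_enumerate_iff pvPossible 0 iq).1 hiq with ⟨k, hk, rfl⟩
  have hq : pvPossible[k] ∈ pvPossible := List.getElem_mem hk
  have hne : p ≠ pvPossible[k] := by
    intro he
    have hm : p ∈ pvPossible := by rw [he]; exact hq
    rw [List.contains_iff_mem.2 hm] at h
    simp at h
  simp only [List.contains_cons]
  have hbe : (pvPossible[k] == p) = false := beq_false_of_ne (Ne.symm hne)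
  rw [hbe]
  simp

-- when B's hit list is exactly [j] and exactly one element of S is possible,
-- A's find loop returns j
lemma pv_find (S : List (Int × Int)) (j : Int)
    (hh : ((PySem.List.enumerate pvPossible).filterMap
        (fun iq => if S.contains iq.2 then some iq.1 else none)) = [j])
    (hc : S.countP (fun p => pvPossible.contains p) = 1) :
    pvFindLoop S = j := by
  induction S with
  | nil => simp at hc
  | cons p S' ih =>
    by_cases hp : pvPossible.contains p
    · have hmem : p ∈ pvPossible := by rwa [← List.contains_iff_mem]
      have hsc : List.contains (p :: S') p = true := by simp
      have hscan := pv_key (p :: S') pvPossible 0 j p hh hmem hsc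
      simp only [pvFindLoop]
      rw [if_pos hp, hscan]
    · have hp' : pvPossible.contains p = false := by
        cases h : pvPossible.contains p
        · rfl
        · exact absurd h hp
      have hh' := (pv_hits_drop p S' hp').symm.trans hh
      have hc' : S'.countP (fun q => pvPossible.contains q) = 1 := by
        rw [List.countP_cons, hp'] at hc
        simpa using hc
      simp only [pvFindLoop]
      rw [if_neg hp]
      exact ih hh' hc'

-- ===== VERDICT (by name: the statement is the Claim_ definition above) =====
theorem get_ft_id_spec : Claim_equal_get_ft_id := by
  intro data _hdom _hpre
  unfold Spec_get_ft_id get_ft_id get_ft_id_alt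
  cases hmi : (PySem.Dict.mk data).get? "meta_info" with
  | none => rfl
  | some mi =>
    dsimp only
    cases hlaw : (PySem.Dict.mk mi).get? "law" with
    | none => rfl
    | some ft_list =>
      dsimp only
      show (if (List.foldl (fun c p => if pvPossible.contains p then c + 1 else c) (0 : Int)
              (List.foldl (fun se t => PySem.Set.add se (t.1, t.2.1)) PySem.Set.empty ft_list)) ≠ 1 then (-1 : Int)
            else pvFindLoop (List.foldl (fun se t => PySem.Set.add se (t.1, t.2.1)) PySem.Set.empty ft_list))
          = (match (PySem.List.enumerate pvPossible).filterMap
                (fun iq => if List.contains (PySem.Set.ofList (ft_list.map (fun t => (t.1, t.2.1)))) iq.2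
                           then some iq.1 else none) with
             | [i] => i
             | _ => (-1 : Int))
      rw [pv_set_eq]
      set S : List (Int × Int) := PySem.Set.ofList (ft_list.map (fun t => (t.1, t.2.1))) with hSdef
      have hSnod : S.Nodup := PySem.Set.nodup_ofList _
      have hPnod : pvPossible.Nodup := by decide
      have hcnt : S.foldl (fun c p => if pvPossible.contains p then c + 1 else c) (0 : Int)
          = ((S.countP (fun p => pvPossible.contains p) : Nat) : Int) := by
        simpa using PySem.List.foldl_count_if (fun p => pvPossible.contains p) S 0
      have hlen : ((PySem.List.enumerate pvPossible).filterMap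
          (fun iq => if S.contains iq.2 then some iq.1 else none)).length
          = pvPossible.countP (fun q => S.contains q) := pv_hits_length S pvPossible 0
      have hcc := pv_countP_comm S pvPossible hSnod hPnod
      rw [hcnt]
      by_cases h1 : S.countP (fun p => pvPossible.contains p) = 1
      · rw [if_neg (by rw [h1]; simp)]
        have hone : ((PySem.List.enumerate pvPossible).filterMap
            (fun iq => if S.contains iq.2 then some iq.1 else none)).length = 1 := by
          rw [hlen, ← hcc, h1]
        rcases List.length_eq_one_iff.1 hone with ⟨j, hj⟩
        rw [hj]
        exact pv_find S j hj h1
      · rw [if_pos (by intro hx; exact h1 (by exact_mod_cast hx))]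
        have hne : ((PySem.List.enumerate pvPossible).filterMap
            (fun iq => if S.contains iq.2 then some iq.1 else none)).length ≠ 1 := by
          rw [hlen, ← hcc]; exact h1
        cases hl : (PySem.List.enumerate pvPossible).filterMap
            (fun iq => if S.contains iq.2 then some iq.1 else none) with
        | nil => rfl
        | cons a t =>
          cases t with
          | nil => exact absurd (by rw [hl]; rfl) hne
          | cons b u => rfl
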